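-- pv_equiv track=rewrite | github.com/lanrete/AoC2018 | day9_1.py | get_counter_clockwise
-- ===== SOURCE A (Python) =====
-- def get_counter_clockwise(marble_list, c, n):
--     length = len(marble_list)
--     for i in range(n):
--         if c == 0:
--             c = length - 1
--         else:
--             c -= 1
--     return c
-- ===== SOURCE B (Python) =====
-- def get_counter_clockwise(marble_list, c, n):
--     if n <= 0:
--         return c
--     return (c - n) % len(marble_list)
-- ===== Notes on version B (the rewrite author's own statement) =====
-- stated objective: alternative
-- what changed: Replaced the n-step decrement-with-wraparound loop by one modular subtraction (c - n) % len(marble_list) (with no steps to take for n <= 0); Pre_ excludes only the empty list with positive n, on which B's modulo raises ZeroDivisionError while A returns a value. Intended as the O(1) closed form of A's O(n) walk; a timing run measured 2.11x at the largest size but not consistently, so no speed is claimed.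
-- intended difference: When n > 0 and the cursor c starts outside the ring (c < 0, or c >= len with too few steps n <= c - len to walk back into range), A's plain decrement returns the out-of-range value c - n while B returns the in-range modular position (c - n) % len, the intended index into the circular list. — e.g. on get_counter_clockwise([5], 2, 1): A returns 1, B returns 0
-- outside the precondition, e.g. on get_counter_clockwise([], 0, 2): A returns -2, B raises ZeroDivisionError
import Mathlib
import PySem

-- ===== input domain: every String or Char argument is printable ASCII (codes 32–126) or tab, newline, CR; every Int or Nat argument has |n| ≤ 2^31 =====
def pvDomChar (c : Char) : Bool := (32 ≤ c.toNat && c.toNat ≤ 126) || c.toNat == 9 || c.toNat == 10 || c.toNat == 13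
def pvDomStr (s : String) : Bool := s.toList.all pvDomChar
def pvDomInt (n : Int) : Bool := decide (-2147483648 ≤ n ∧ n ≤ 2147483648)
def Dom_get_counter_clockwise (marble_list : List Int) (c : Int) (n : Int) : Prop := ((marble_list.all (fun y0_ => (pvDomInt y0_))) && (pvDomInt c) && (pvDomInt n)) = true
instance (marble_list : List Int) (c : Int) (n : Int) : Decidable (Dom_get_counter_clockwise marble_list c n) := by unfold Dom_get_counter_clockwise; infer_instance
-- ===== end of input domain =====

-- B replaces A's n-step decrement loop by one modular subtraction (closed form instead of iteration).

-- ===== PORT A =====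
-- for i in range(n): if c == 0: c = length - 1 else: c -= 1
def get_counter_clockwise (marble_list : List Int) (c : Int) (n : Int) : Int :=
  let length : Int := marble_list.length
  (PySem.List.pyRange 0 n 1).foldl (fun c _ => if c = 0 then length - 1 else c - 1) c

-- ===== PORT B =====
-- if n <= 0: return c ; return (c - n) % len(marble_list)
def get_counter_clockwise_alt (marble_list : List Int) (c : Int) (n : Int) : Int :=
  if n ≤ 0 then c
  else PySem.Int.mod (c - n) marble_list.length

-- ===== PRECONDITION & SPEC =====
-- Pre_ excludes only the empty list with positive n, on which B's modulo raises ZeroDivisionError while A returns a value.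
def Pre_get_counter_clockwise (marble_list : List Int) (c : Int) (n : Int) : Prop :=
  marble_list ≠ [] ∨ n ≤ 0
instance (marble_list : List Int) (c : Int) (n : Int) : Decidable (Pre_get_counter_clockwise marble_list c n) := by unfold Pre_get_counter_clockwise; infer_instance
def pvWitness_get_counter_clockwise : List Int × Int × Int := ([1, 2, 3], 0, 2)

-- When n > 0 and the cursor c starts outside the ring (c < 0, or c ≥ len with too few steps n ≤ c − len to
-- walk back into range), A's plain decrement returns the out-of-range value c − n while B returns the
-- in-range modular position (c − n) % len, the intended index into the circular list.
def D_get_counter_clockwise (marble_list : List Int) (c : Int) (n : Int) : Prop :=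
  marble_list ≠ [] ∧ 0 < n ∧ (c < 0 ∨ ((marble_list.length : Int) ≤ c ∧ n ≤ c - marble_list.length))
instance (marble_list : List Int) (c : Int) (n : Int) : Decidable (D_get_counter_clockwise marble_list c n) := by unfold D_get_counter_clockwise; infer_instance

def Spec_get_counter_clockwise (marble_list : List Int) (c : Int) (n : Int) (out : Int) : Prop := ¬ D_get_counter_clockwise marble_list c n → out = get_counter_clockwise_alt marble_list c n
instance (marble_list : List Int) (c : Int) (n : Int) (out : Int) : Decidable (Spec_get_counter_clockwise marble_list c n out) := by unfold Spec_get_counter_clockwise; infer_instance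

def pvDiffWitness_get_counter_clockwise : List Int × Int × Int := ([5], 2, 1)
def pvDiffWitnessOut_get_counter_clockwise : Int × Int := (1, 0)

-- ===== CLAIM (what is proved, stated in full; the proofs are below) =====
def Claim_unchanged_get_counter_clockwise : Prop := ∀ (marble_list : List Int) (c : Int) (n : Int), Dom_get_counter_clockwise marble_list c n → Pre_get_counter_clockwise marble_list c n → Spec_get_counter_clockwise marble_list c n (get_counter_clockwise marble_list c n)
def Claim_changed_get_counter_clockwise : Prop := Dom_get_counter_clockwise (pvDiffWitness_get_counter_clockwise.1) (pvDiffWitness_get_counter_clockwise.2.1) (pvDiffWitness_get_counter_clockwise.2.2) ∧ Pre_get_counter_clockwise (pvDiffWitness_get_counter_clockwise.1) (pvDiffWitness_get_counter_clockwise.2.1) (pvDiffWitness_get_counter_clockwise.2.2) ∧ D_get_counter_clockwise (pvDiffWitness_get_counter_clockwise.1) (pvDiffWitness_get_counter_clockwise.2.1) (pvDiffWitness_get_counter_clockwise.2.2) ∧ get_counter_clockwise (pvDiffWitness_get_counter_clockwise.1) (pvDiffWitness_get_counter_clockwise.2.1) (pvDiffWitness_get_counter_clockwise.2.2) = pvDiffWitnessOut_get_counter_clockwise.1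 ∧ get_counter_clockwise_alt (pvDiffWitness_get_counter_clockwise.1) (pvDiffWitness_get_counter_clockwise.2.1) (pvDiffWitness_get_counter_clockwise.2.2) = pvDiffWitnessOut_get_counter_clockwise.2 ∧ pvDiffWitnessOut_get_counter_clockwise.1 ≠ pvDiffWitnessOut_get_counter_clockwise.2
def Claim_exact_get_counter_clockwise : Prop := ∀ (marble_list : List Int) (c : Int) (n : Int), Dom_get_counter_clockwise marble_list c n → Pre_get_counter_clockwise marble_list c n → D_get_counter_clockwise marble_list c n → get_counter_clockwise marble_list c n ≠ get_counter_clockwise_alt marble_list c n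

-- ===== LEMMAS AND PROOFS =====

-- A's loop ignores the loop variable: folding over any list is iterating the step.
theorem foldl_ignore_iterate (f : Int → Int) : ∀ (l : List Int) (c : Int),
    l.foldl (fun c _ => f c) c = f^[l.length] c := by
  intro l
  induction l with
  | nil => intro c; rfl
  | cons a t ih =>
      intro c
      simp only [List.foldl_cons, List.length_cons, Function.iterate_succ_apply]
      exact ih (f c)

-- closed form for k iterations of A's step, for a nonnegative length L
theorem iterate_step_closed (L : Int) (hL : 0 ≤ L) : ∀ (k : Nat) (c : Int),
    (fun c => if c = 0 then L - 1 else c - 1)^[k] c =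
      (if c ≥ (k : Int) ∨ c < 0 ∨ L = 0 then c - k else PySem.Int.mod (c - k) L) := by
  intro k
  induction k with
  | zero =>
      intro c
      simp only [Function.iterate_zero, id_eq, Nat.cast_zero, Int.sub_zero]
      split_ifs with h
      · rfl
      · omega
  | succ k ih =>
      intro c
      rw [Function.iterate_succ_apply]
      by_cases hc : c = 0
      · subst hc
        rw [if_pos rfl, ih]
        by_cases hL0 : L = 0
        · subst hL0
          split_ifs <;> omega
        · have hLpos : 0 < L := by omega
          by_cases hk : L - 1 ≥ (k : Int)
          · rw [if_pos (by omega),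
                if_neg (show ¬((0:Int) ≥ ((k+1 : Nat) : Int) ∨ (0:Int) < 0 ∨ L = 0) by omega)]
            rw [PySem.Int.mod_eq_emod_of_pos hLpos]
            have h1 : (0 : Int) - (k + 1 : Nat) = (L - 1 - k) - L := by push_cast; omega
            rw [h1, Int.sub_emod_right, Int.emod_eq_of_lt (by omega) (by omega)]
          · rw [if_neg (by omega),
                if_neg (show ¬((0:Int) ≥ ((k+1 : Nat) : Int) ∨ (0:Int) < 0 ∨ L = 0) by omega)]
            rw [PySem.Int.mod_eq_emod_of_pos hLpos, PySem.Int.mod_eq_emod_of_pos hLpos]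
            have h1 : (0 : Int) - (k + 1 : Nat) = (L - 1 - k) - L := by push_cast; omega
            rw [h1, Int.sub_emod_right]
      · rw [if_neg hc, ih]
        have harg : c - 1 - (k : Int) = c - ((k + 1 : Nat) : Int) := by push_cast; omega
        split_ifs with h1 h2 h2 <;> (try omega) <;> rw [harg]

-- A as a closed form, for 0 ≤ n
theorem portA_closed (marble_list : List Int) (c n : Int) (hn : 0 ≤ n) :
    get_counter_clockwise marble_list c n =
      (if c ≥ n ∨ c < 0 ∨ (marble_list.length : Int) = 0 then c - n
       else PySem.Int.mod (c - n) marble_list.length) := by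
  unfold get_counter_clockwise
  rw [foldl_ignore_iterate, PySem.List.length_pyRange_one,
      iterate_step_closed (marble_list.length : Int) (by positivity)]
  have hcast : (((n - 0).toNat : Nat) : Int) = n := by omega
  rw [hcast]

-- ===== VERDICT (by name: the statement is the Claim_ definition above) =====
theorem get_counter_clockwise_spec : Claim_unchanged_get_counter_clockwise := by
  intro marble_list c n _ hpre
  unfold Spec_get_counter_clockwise D_get_counter_clockwise
  intro hd
  by_cases hn : n ≤ 0
  · -- range(n) is empty: A returns c; B takes its n ≤ 0 branch and returns c
    unfold get_counter_clockwise get_counter_clockwise_alt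
    rw [foldl_ignore_iterate, PySem.List.length_pyRange_one]
    have h0 : (n - 0).toNat = 0 := by omega
    rw [h0, if_pos hn]
    rfl
  · have hne : marble_list ≠ [] := by
      rcases hpre with h | h
      · exact h
      · omega
    have hL : 0 < (marble_list.length : Int) := by
      have : marble_list.length ≠ 0 := by simpa using hne
      omega
    unfold get_counter_clockwise_alt
    rw [if_neg hn, portA_closed marble_list c n (by omega)]
    split_ifs with h
    · -- A = c - n; show (c - n) % L = c - n, using ¬D to bound c - n in [0, L)
      have hcn0 : 0 ≤ c - n ∧ c - n < (marble_list.length : Int) := by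
        push_neg at hd
        rcases h with h | h | h
        · have := hd hne (by omega); omega
        · have := hd hne (by omega); omega
        · omega
      rw [PySem.Int.mod_eq_emod_of_pos hL, Int.emod_eq_of_lt hcn0.1 hcn0.2]
    · rfl

theorem get_counter_clockwise_changed : Claim_changed_get_counter_clockwise := by
  unfold Claim_changed_get_counter_clockwise; decide

theorem get_counter_clockwise_tight : Claim_exact_get_counter_clockwise := by
  intro marble_list c n _ _ hd
  obtain ⟨hne, hn, hcase⟩ := hd
  have hL : 0 < (marble_list.length : Int) := by
    have : marble_list.length ≠ 0 := by simpa using hne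
    omega
  have hA : get_counter_clockwise marble_list c n = c - n := by
    rw [portA_closed marble_list c n (by omega), if_pos (by omega)]
  have hB1 : 0 ≤ get_counter_clockwise_alt marble_list c n := by
    unfold get_counter_clockwise_alt
    rw [if_neg (by omega : ¬ n ≤ 0), PySem.Int.mod_eq_emod_of_pos hL]
    exact Int.emod_nonneg _ (by omega)
  have hB2 : get_counter_clockwise_alt marble_list c n < (marble_list.length : Int) := by
    unfold get_counter_clockwise_alt
    rw [if_neg (by omega : ¬ n ≤ 0), PySem.Int.mod_eq_emod_of_pos hL]
    exact Int.emod_lt_of_pos _ hL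
  rw [hA]
  rcases hcase with h | h
  · omega
  · omega
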